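-- pv_equiv track=rewrite | github.com/telltaleatheist/ContentStudio | python/core/output_handler.py | _clean_name_with_spaces
-- ===== SOURCE A (Python) =====
-- def _clean_name_with_spaces(name: str, max_length: int = 100) -> str:
--     """
--     Clean name for file system while preserving spaces
--
--     Args:
--         name: Original name
--         max_length: Maximum length
--
--     Returns:
--         str: Cleaned name with spaces
--     """
--     # Remove only truly invalid filesystem characters
--     invalid_chars = '<>:"/\\|?*\x00'
--     for char in invalid_chars:
--         name = name.replace(char, '')
--
--     # Clean up multiple spaces
--     name = ' '.join(name.split())
--
--     # Truncate if too long
--     if len(name) > max_length: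
--         name = name[:max_length].rstrip()
--
--     # Remove trailing dots and spaces
--     name = name.rstrip('. ')
--
--     return name or "metadata"
-- ===== SOURCE B (Python) =====
-- def _clean_name_with_spaces(name: str, max_length: int = 100) -> str:
--     """Single left-to-right scan: drop invalid chars and collapse whitespace runs
--     to one space via a pending-space flag, then truncate and strip as before."""
--     invalid = '<>:"/\\|?*\x00'
--     out = []
--     pending = False
--     for ch in name:
--         if ch in invalid:
--             continue
--         if ch.isspace():
--             if out:
--                 pending = True
--         else:
--             if pending:
--                 out.append(' ')
--                 pending = False
--             out.append(ch)
--     name = ''.join(out)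
--
--     if len(name) > max_length:
--         name = name[:max_length].rstrip()
--
--     name = name.rstrip('. ')
--
--     return name or "metadata"
-- ===== Notes on version B (the rewrite author's own statement) =====
-- stated objective: alternative
-- what changed: The multi-pass pipeline (ten str.replace passes plus a whitespace split-and-rejoin) is fused into one left-to-right scan that skips invalid characters and collapses whitespace runs with a pending-space flag.
import Mathlib
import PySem

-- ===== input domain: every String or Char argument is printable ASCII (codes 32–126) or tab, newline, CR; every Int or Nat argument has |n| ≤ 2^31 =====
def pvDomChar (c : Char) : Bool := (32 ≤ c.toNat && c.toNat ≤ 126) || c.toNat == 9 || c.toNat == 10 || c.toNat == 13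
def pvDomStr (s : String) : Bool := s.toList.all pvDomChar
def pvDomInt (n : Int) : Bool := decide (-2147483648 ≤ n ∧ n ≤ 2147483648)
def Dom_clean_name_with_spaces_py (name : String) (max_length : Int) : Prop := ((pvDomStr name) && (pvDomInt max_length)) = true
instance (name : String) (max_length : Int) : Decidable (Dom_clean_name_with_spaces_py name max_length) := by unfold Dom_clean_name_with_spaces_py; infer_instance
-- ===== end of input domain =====

-- B fuses A's multi-pass cleaning (ten replace passes + ' '.join(split())) into one
-- left-to-right scan with a pending-space flag; same truncation and stripping afterwards.

-- ===== PORT A =====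
-- shared literal: the invalid filesystem characters '<>:"/\|?*\x00'
def pvInvalidChars : List Char := ['<', '>', ':', '"', '/', '\\', '|', '?', '*', '\x00']

-- name.rstrip('. ') — ported by hand (PySem has no right-only strip with a char set);
-- exact: drop '.' and ' ' from the right end only.
def pvRstripDotSpace (s : List Char) : List Char :=
  (s.reverse.dropWhile (fun c => c = '.' ∨ c = ' ')).reverse

def clean_name_with_spaces_py (name : String) (max_length : Int) : String :=
  -- for char in invalid_chars: name = name.replace(char, '')
  let cs := pvInvalidChars.foldl (fun s c => PySem.Chars.replace s [c] []) name.toList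
  -- name = ' '.join(name.split())
  let cs := PySem.Chars.join [' '] (PySem.Chars.split₀ cs)
  -- if len(name) > max_length: name = name[:max_length].rstrip()
  let cs := if PySem.Chars.len cs > max_length
            then PySem.Chars.rstrip (PySem.Chars.slice cs none (some max_length))
            else cs
  -- name = name.rstrip('. ')
  let cs := pvRstripDotSpace cs
  -- return name or "metadata"
  if cs.isEmpty then "metadata" else String.ofList cs

-- ===== PORT B =====
-- one scan step: skip invalid chars; on whitespace set the pending flag (only once
-- output exists); on a kept char flush one ' ' if pending, then append the char.
def pvAltStep (st : List Char × Bool) (c : Char) : List Char × Bool :=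
  if c ∈ pvInvalidChars then st
  else if PySem.Chars.isspace c then
    (if st.1.isEmpty then st else (st.1, true))
  else
    (if st.2 then st.1 ++ [' '] ++ [c] else st.1 ++ [c], false)

def clean_name_with_spaces_py_alt (name : String) (max_length : Int) : String :=
  let cs := (name.toList.foldl pvAltStep ([], false)).1
  let cs := if PySem.Chars.len cs > max_length
            then PySem.Chars.rstrip (PySem.Chars.slice cs none (some max_length))
            else cs
  let cs := pvRstripDotSpace cs
  if cs.isEmpty then "metadata" else String.ofList cs

-- ===== PRECONDITION & SPEC =====
def Spec_clean_name_with_spaces_py (name : String) (max_length : Int) (out : String) : Prop := out = clean_name_with_spaces_py_alt name max_length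
instance (name : String) (max_length : Int) (out : String) : Decidable (Spec_clean_name_with_spaces_py name max_length out) := by unfold Spec_clean_name_with_spaces_py; infer_instance

-- ===== CLAIM (what is proved, stated in full; the proofs are below) =====
def Claim_equal_clean_name_with_spaces_py : Prop := ∀ (name : String) (max_length : Int), Dom_clean_name_with_spaces_py name max_length → Spec_clean_name_with_spaces_py name max_length (clean_name_with_spaces_py name max_length)

-- ===== LEMMAS AND PROOFS =====

-- the list of maximal non-whitespace runs (the common spec for split₀ and B's scan)
def pvWords : List Char → List (List Char)
  | [] => []
  | c :: s =>
    if PySem.Chars.isspace c then pvWords s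
    else (c :: s.takeWhile (fun d => !PySem.Chars.isspace d)) ::
         pvWords (s.dropWhile (fun d => !PySem.Chars.isspace d))
  termination_by s => s.length
  decreasing_by
    · exact Nat.lt_succ_of_le le_rfl
    · exact Nat.lt_succ_of_le (List.length_dropWhile_le _ _)

-- name.replace(c, '') is a character filter
theorem pvReplaceGo_single (c : Char) : ∀ (fuel : Nat) (l acc : List Char), l.length ≤ fuel →
    PySem.Chars.replace.go [c] [] fuel l acc = acc.reverse ++ l.filter (fun x => x ≠ c) := by
  intro fuel
  induction fuel with
  | zero =>
    intro l acc h
    have : l = [] := List.eq_nil_of_length_eq_zero (Nat.le_zero.mp h)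
    subst this; simp [PySem.Chars.replace.go]
  | succ n ih =>
    intro l acc h
    cases l with
    | nil => simp [PySem.Chars.replace.go]
    | cons x t =>
      simp only [PySem.Chars.replace.go]
      by_cases hx : x = c
      · subst hx
        have hpre : List.isPrefixOf [x] (x :: t) = true := by
          simp [List.isPrefixOf]
        simp only [hpre, if_pos]
        rw [ih _ _ (by simpa using Nat.le_of_succ_le_succ h)]
        simp
      · have hpre : List.isPrefixOf [c] (x :: t) = false := by
          simp [List.isPrefixOf]
          exact fun hc => hx hc.symm
        simp only [hpre, Bool.false_eq_true, if_false]
        rw [ih _ _ (by simpa using Nat.le_of_succ_le_succ h)]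
        simp [hx]

theorem pvReplace_single (s : List Char) (c : Char) :
    PySem.Chars.replace s [c] [] = s.filter (fun x => x ≠ c) := by
  simp only [PySem.Chars.replace, List.isEmpty_cons, Bool.false_eq_true, if_false]
  exact pvReplaceGo_single c s.length s [] le_rfl

-- the ten replace passes together are one filter
theorem pvFoldlReplace (il : List Char) : ∀ (s : List Char),
    il.foldl (fun s c => PySem.Chars.replace s [c] []) s = s.filter (fun x => !il.contains x) := by
  induction il with
  | nil => intro s; simp
  | cons c t ih =>
    intro s
    simp only [List.foldl_cons]
    rw [pvReplace_single, ih, List.filter_filter]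
    apply List.filter_congr
    intro x _
    by_cases hx : x = c <;> simp [hx]

-- split₀.go, characterised by pvWords
theorem pvSplitGo : ∀ (s cur : List Char) (accW : List (List Char)),
    PySem.Chars.split₀.go s cur accW =
      accW.reverse ++
        (if cur.isEmpty then pvWords s
         else (cur.reverse ++ s.takeWhile (fun d => !PySem.Chars.isspace d)) ::
              pvWords (s.dropWhile (fun d => !PySem.Chars.isspace d))) := by
  intro s
  induction s with
  | nil =>
    intro cur accW
    cases cur <;> simp [PySem.Chars.split₀.go, pvWords]
  | cons c rest ih =>
    intro cur accW
    by_cases hc : PySem.Chars.isspace c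
    · cases cur with
      | nil => simp [PySem.Chars.split₀.go, hc, ih, pvWords]
      | cons y ys => simp [PySem.Chars.split₀.go, hc, ih, pvWords]
    · cases cur with
      | nil => simp [PySem.Chars.split₀.go, hc, ih, pvWords]
      | cons y ys => simp [PySem.Chars.split₀.go, hc, ih]

theorem pvSplit_eq_words (s : List Char) : PySem.Chars.split₀ s = pvWords s := by
  simp [PySem.Chars.split₀, pvSplitGo]

-- join [' '] (w :: l) peels one word
theorem pvJoin_cons (w : List Char) (l : List (List Char)) :
    PySem.Chars.join [' '] (w :: l) =
      w ++ (if l.isEmpty then [] else ' ' :: PySem.Chars.join [' '] l) := by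
  cases l with
  | nil => simp [PySem.Chars.join_singleton]
  | cons x xs => simp [PySem.Chars.join_cons_cons]

-- the whitespace-collapsing scan (invalid chars already gone)
def pvWsStep (st : List Char × Bool) (c : Char) : List Char × Bool :=
  if PySem.Chars.isspace c then
    (if st.1.isEmpty then st else (st.1, true))
  else
    (if st.2 then st.1 ++ [' '] ++ [c] else st.1 ++ [c], false)

def pvGlue (s : List Char) : List Char :=
  if (pvWords s).isEmpty then [] else ' ' :: PySem.Chars.join [' '] (pvWords s)

-- invariant of B's scan: the accumulated output plus what the rest contributes
theorem pvWsFold : ∀ (s : List Char) (a : List Char) (p : Bool), (p = true → a ≠ []) →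
    (s.foldl pvWsStep (a, p)).1 =
      a ++ (if p then pvGlue s
            else if a.isEmpty then PySem.Chars.join [' '] (pvWords s)
            else s.takeWhile (fun d => !PySem.Chars.isspace d) ++
                 pvGlue (s.dropWhile (fun d => !PySem.Chars.isspace d))) := by
  intro s
  induction s with
  | nil =>
    intro a p hp
    cases p with
    | false =>
      by_cases ha : a = [] <;> simp [ha, pvWords, pvGlue, PySem.Chars.join_nil]
    | true => simp [pvGlue, pvWords]
  | cons c rest ih =>
    intro a p hp
    by_cases hc : PySem.Chars.isspace c
    · have hw : pvWords (c :: rest) = pvWords rest := by rw [pvWords]; simp [hc]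
      cases p with
      | true =>
        have ha : a ≠ [] := hp rfl
        have ha' : a.isEmpty = false := by simpa using ha
        simp only [List.foldl_cons, pvWsStep, hc, if_true, ha', Bool.false_eq_true, if_false]
        rw [ih a true (fun _ => ha)]
        simp [pvGlue, hw]
      | false =>
        by_cases ha : a = []
        · subst ha
          simp only [List.foldl_cons, pvWsStep, hc, if_true, List.isEmpty_nil]
          rw [ih [] false (by simp)]
          simp [hw]
        · have ha' : a.isEmpty = false := by simpa using ha
          simp only [List.foldl_cons, pvWsStep, hc, if_true, ha', Bool.false_eq_true, if_false]
          rw [ih a true (fun _ => ha)]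
          simp [List.takeWhile, List.dropWhile, hc, pvGlue, hw]
    · have hc' : PySem.Chars.isspace c = false := by simpa using hc
      have hw : pvWords (c :: rest) =
          (c :: rest.takeWhile (fun d => !PySem.Chars.isspace d)) ::
          pvWords (rest.dropWhile (fun d => !PySem.Chars.isspace d)) := by
        rw [pvWords]; simp [hc']
      cases p with
      | true =>
        have ha : a ≠ [] := hp rfl
        have ha' : a.isEmpty = false := by simpa using ha
        simp only [List.foldl_cons, pvWsStep, hc', Bool.false_eq_true, if_false, if_true]
        rw [ih (a ++ [' '] ++ [c]) false (by simp)]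
        have hane : (a ++ [' '] ++ [c]).isEmpty = false := by simp
        simp only [hane, Bool.false_eq_true, if_false]
        simp only [pvGlue, hw, List.isEmpty_cons, Bool.false_eq_true, if_false]
        rw [pvJoin_cons]
        simp [List.append_assoc]
      | false =>
        by_cases ha : a = []
        · subst ha
          simp only [List.foldl_cons, pvWsStep, hc', Bool.false_eq_true, if_false,
            List.nil_append]
          rw [ih [c] false (by simp)]
          simp only [List.isEmpty_cons, List.isEmpty_nil, Bool.false_eq_true, if_false, if_true,
            hw]
          rw [pvJoin_cons]
          simp [pvGlue]
        · have ha' : a.isEmpty = false := by simpa using ha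
          simp only [List.foldl_cons, pvWsStep, hc', Bool.false_eq_true, if_false]
          rw [ih (a ++ [c]) false (by simp)]
          have hane : (a ++ [c]).isEmpty = false := by simp
          simp only [hane, ha', Bool.false_eq_true, if_false]
          simp [List.takeWhile, List.dropWhile, hc']

-- B's scan steps over invalid characters are the identity: drop them by a filter
theorem pvAltStep_eq_filter : ∀ (s : List Char) (st : List Char × Bool),
    s.foldl pvAltStep st = (s.filter (fun x => !pvInvalidChars.contains x)).foldl pvWsStep st := by
  intro s
  induction s with
  | nil => intro st; simp
  | cons c rest ih =>
    intro st
    by_cases hm : c ∈ pvInvalidChars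
    · have : pvInvalidChars.contains c = true := by simpa using hm
      simp only [List.foldl_cons, pvAltStep, hm, if_true, List.filter_cons, this, Bool.not_true,
        Bool.false_eq_true, if_false]
      exact ih st
    · have : pvInvalidChars.contains c = false := by simpa using hm
      simp only [List.foldl_cons, pvAltStep, hm, if_false, List.filter_cons,
        this, Bool.not_false, if_true]
      rw [ih]
      rfl

-- the cleaned string: A's pipeline output equals B's one-pass scan output
theorem pvCore (cs : List Char) :
    PySem.Chars.join [' ']
        (PySem.Chars.split₀ (pvInvalidChars.foldl (fun s c => PySem.Chars.replace s [c] []) cs)) =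
      (cs.foldl pvAltStep ([], false)).1 := by
  rw [pvFoldlReplace, pvSplit_eq_words, pvAltStep_eq_filter,
    pvWsFold _ [] false (by simp)]
  simp

-- ===== VERDICT (by name: the statement is the Claim_ definition above) =====
theorem clean_name_with_spaces_py_spec : Claim_equal_clean_name_with_spaces_py := by
  intro name max_length _
  unfold Spec_clean_name_with_spaces_py clean_name_with_spaces_py clean_name_with_spaces_py_alt
  simp only [pvCore name.toList]
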